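-- pv_equiv track=rewrite | github.com/SJLee-83/CodingTest | c0923_babbling_f.py | solution
-- ===== SOURCE A (Python) =====
-- def solution(babbling):
--     answer = 0
--     pronounceable = ["aya", "ye", "woo", "ma"]
--
--     for word in babbling:
--         # 1. 발음 가능한 단어를 공백으로 치환
--         for p_word in pronounceable:
--             word = word.replace(p_word, " ") # replace로 공백으로 치환
--
--         # 2. 모든 공백을 제거
--         word = word.replace(" ", "")
--
--         # 3. 공백 제거 후 남는 것이 없다면 발음 가능한 단어
--         if not word:
--             answer += 1
--
--     return answer
-- ===== SOURCE B (Python) =====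
-- def solution(babbling):
--     def ok(w):
--         i = 0
--         while i < len(w):
--             if w.startswith("aya", i):
--                 i += 3
--             elif w.startswith("ye", i):
--                 i += 2
--             elif w.startswith("woo", i):
--                 i += 3
--             elif w.startswith("ma", i):
--                 i += 2
--             else:
--                 return False
--         return True
--     return sum(1 if ok(w) else 0 for w in babbling)
-- ===== Notes on version B (the rewrite author's own statement) =====
-- stated objective: alternative
-- what changed: Replaces A's four-pass replace-with-space-then-strip elimination by a single left-to-right greedy parse per word (the four syllables start with distinct letters, so the decoding is deterministic), with early exit at the first unparsable position.
-- intended difference: On inputs containing a word that is a concatenation of the allowed syllables and literal spaces (e.g. [" "] or ["aya ma"]), A counts such a word as pronounceable because its space-sentinel trick deletes all spaces before the emptiness test, while B rejects any word containing a space; babbling words are made only of the four syllables, so B's rejection is the intended behaviour. — e.g. on solution(["aya ma"]): A returns 1, B returns 0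
import Mathlib
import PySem

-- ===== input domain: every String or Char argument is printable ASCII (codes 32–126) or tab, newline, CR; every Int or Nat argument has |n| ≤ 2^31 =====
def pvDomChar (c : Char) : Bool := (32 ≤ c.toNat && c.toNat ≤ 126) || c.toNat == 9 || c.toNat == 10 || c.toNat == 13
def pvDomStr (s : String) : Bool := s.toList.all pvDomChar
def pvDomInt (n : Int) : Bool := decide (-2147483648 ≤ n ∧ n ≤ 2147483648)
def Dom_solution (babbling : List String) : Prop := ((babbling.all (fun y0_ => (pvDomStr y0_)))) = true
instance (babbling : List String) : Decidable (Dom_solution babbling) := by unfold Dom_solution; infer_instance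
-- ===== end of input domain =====

-- B replaces A's four replace-with-space passes plus space-strip by a single greedy
-- left-to-right parse per word (an alternative algorithm, not claimed faster); A and B
-- differ only on words mixing the allowed syllables with literal spaces (see D_solution).

-- ===== PORT A =====
def solution (babbling : List String) : Int :=
  babbling.foldl (fun answer word =>
    -- for p_word in pronounceable: word = word.replace(p_word, " ")
    let word1 := (["aya", "ye", "woo", "ma"] : List String).foldl
      (fun w p => PySem.Str.replace w p " ") word
    -- word = word.replace(" ", "")
    let word2 := PySem.Str.replace word1 " " ""
    -- if not word: answer += 1
    if PySem.Str.len word2 = 0 then answer + 1 else answer) 0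

-- ===== PORT B =====
-- ok's while-loop over the index i; word.startswith(t, i) is startswith t on (w.drop i)
def okAlt (w : List Char) (i : Nat) : Bool :=
  if _h : i < w.length then
    if PySem.Chars.startswith (w.drop i) ['a', 'y', 'a'] then okAlt w (i + 3)
    else if PySem.Chars.startswith (w.drop i) ['y', 'e'] then okAlt w (i + 2)
    else if PySem.Chars.startswith (w.drop i) ['w', 'o', 'o'] then okAlt w (i + 3)
    else if PySem.Chars.startswith (w.drop i) ['m', 'a'] then okAlt w (i + 2)
    else false
  else true
termination_by w.length - i
decreasing_by all_goals omega

def solution_alt (babbling : List String) : Int :=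
  (babbling.map (fun w => if okAlt w.toList 0 then (1 : Int) else 0)).sum

-- ===== PRECONDITION & SPEC =====
-- helper used only by D_solution (reached by neither port): greedy matcher for
-- concatenations of the four syllables and literal spaces
def spaceOk : List Char → Bool
  | 'a' :: 'y' :: 'a' :: r => spaceOk r
  | 'y' :: 'e' :: r => spaceOk r
  | 'w' :: 'o' :: 'o' :: r => spaceOk r
  | 'm' :: 'a' :: r => spaceOk r
  | ' ' :: r => spaceOk r
  | [] => true
  | _ => false

-- On words that contain a space but otherwise consist of the allowed syllables (e.g. ["aya ma"]),
-- A counts them as pronounceable because its space-sentinel trick deletes all spaces before the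
-- final emptiness test, while B rejects every word containing a space; babbling words are made
-- only of the four syllables, so B's rejection is the intended behaviour.
def D_solution (babbling : List String) : Prop :=
  ∃ w ∈ babbling, ' ' ∈ w.toList ∧ spaceOk w.toList = true
instance (babbling : List String) : Decidable (D_solution babbling) := by
  unfold D_solution; infer_instance

def Spec_solution (babbling : List String) (out : Int) : Prop :=
  ¬ D_solution babbling → out = solution_alt babbling
instance (babbling : List String) (out : Int) : Decidable (Spec_solution babbling out) := by
  unfold Spec_solution; infer_instance

def pvDiffWitness_solution : List String := ["aya ma"]
def pvDiffWitnessOut_solution : Int × Int := (1, 0)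

-- ===== CLAIM (what is proved, stated in full; the proofs are below) =====
def Claim_unchanged_solution : Prop :=
  ∀ (babbling : List String), Dom_solution babbling → Spec_solution babbling (solution babbling)
def Claim_changed_solution : Prop :=
  Dom_solution pvDiffWitness_solution ∧ D_solution pvDiffWitness_solution ∧
    solution pvDiffWitness_solution = pvDiffWitnessOut_solution.1 ∧
    solution_alt pvDiffWitness_solution = pvDiffWitnessOut_solution.2 ∧
    pvDiffWitnessOut_solution.1 ≠ pvDiffWitnessOut_solution.2
def Claim_exact_solution : Prop :=
  ∀ (babbling : List String), Dom_solution babbling → D_solution babbling →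
    solution babbling ≠ solution_alt babbling

-- ===== LEMMAS AND PROOFS =====

def repl (old new : List Char) : List Char → List Char
  | [] => []
  | c :: t =>
    if 0 < old.length ∧ old.isPrefixOf (c :: t) then
      new ++ repl old new (t.drop (old.length - 1))
    else c :: repl old new t
termination_by s => s.length
decreasing_by all_goals (simp [List.length_drop]; try omega)

lemma go_eq_repl (old new : List Char) (h : old ≠ []) :
    ∀ fuel l acc, l.length ≤ fuel →
      PySem.Chars.replace.go old new fuel l acc = acc.reverse ++ repl old new l := by
  intro fuel
  induction fuel with
  | zero =>
    intro l acc hl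
    have : l = [] := by cases l <;> simp_all
    subst this
    simp [PySem.Chars.replace.go, repl]
  | succ n ih =>
    intro l acc hl
    cases l with
    | nil => simp [PySem.Chars.replace.go, repl]
    | cons c t =>
      rw [PySem.Chars.replace.go]
      by_cases hp : old.isPrefixOf (c :: t)
      · rw [if_pos hp]
        have hol : 0 < old.length := by cases old <;> simp_all
        have hdrop : (c :: t).drop old.length = t.drop (old.length - 1) := by
          cases old with
          | nil => simp_all
          | cons o os => simp
        rw [hdrop]
        rw [ih _ _ (by simp [List.length_drop] at *; omega)]
        rw [repl]
        rw [if_pos ⟨hol, hp⟩]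
        simp
      · rw [if_neg hp]
        rw [ih _ _ (by simp at hl; omega)]
        rw [repl, if_neg (by simp [hp])]
        simp

lemma replace_eq_repl (s old new : List Char) (h : old ≠ []) :
    PySem.Chars.replace s old new = repl old new s := by
  unfold PySem.Chars.replace
  rw [if_neg (by simp [h])]
  simpa using go_eq_repl old new h s.length s [] le_rfl

lemma repl_not_prefix {old : List Char} (new : List Char) {c : Char} {X : List Char}
    (h : ¬ old.isPrefixOf (c :: X)) : repl old new (c :: X) = c :: repl old new X := by
  rw [repl, if_neg (by simp [h])]

lemma repl_skip {old : List Char} (new : List Char) {c : Char} (X : List Char)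
    (h : old.head? ≠ some c) : repl old new (c :: X) = c :: repl old new X := by
  cases old with
  | nil => rw [repl, if_neg (by simp)]
  | cons o os =>
    have : o ≠ c := by simpa using h
    exact repl_not_prefix new (by simp [List.isPrefixOf, this])

lemma repl_hit (old new t : List Char) (h : old ≠ []) :
    repl old new (old ++ t) = new ++ repl old new t := by
  cases old with
  | nil => simp_all
  | cons o os =>
    rw [List.cons_append, repl, if_pos ⟨by simp, by simp [List.isPrefixOf_iff_prefix]⟩]
    simp

lemma repl_head_sp (old t : List Char) :
    (repl old [' '] t).head? = t.head? ∨ (repl old [' '] t).head? = some ' ' := by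
  cases t with
  | nil => left; rw [repl]
  | cons c X =>
    rw [repl]
    split
    · right; rfl
    · left; rfl

-- per-stage helpers: skip a non-matching head / consume a syllable
lemma skipA {c : Char} (X : List Char) (h : c ≠ 'a') :
    repl ['a','y','a'] [' '] (c :: X) = c :: repl ['a','y','a'] [' '] X :=
  repl_skip _ X (by simp [Ne.symm h])
lemma skipY {c : Char} (X : List Char) (h : c ≠ 'y') :
    repl ['y','e'] [' '] (c :: X) = c :: repl ['y','e'] [' '] X :=
  repl_skip _ X (by simp [Ne.symm h])
lemma skipW {c : Char} (X : List Char) (h : c ≠ 'w') :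
    repl ['w','o','o'] [' '] (c :: X) = c :: repl ['w','o','o'] [' '] X :=
  repl_skip _ X (by simp [Ne.symm h])
lemma skipM {c : Char} (X : List Char) (h : c ≠ 'm') :
    repl ['m','a'] [' '] (c :: X) = c :: repl ['m','a'] [' '] X :=
  repl_skip _ X (by simp [Ne.symm h])
lemma skipD {c : Char} (X : List Char) (h : c ≠ ' ') :
    repl [' '] [] (c :: X) = c :: repl [' '] [] X :=
  repl_skip _ X (by simp [Ne.symm h])
lemma hitA (X : List Char) :
    repl ['a','y','a'] [' '] ('a' :: 'y' :: 'a' :: X) = ' ' :: repl ['a','y','a'] [' '] X := by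
  simpa using repl_hit ['a','y','a'] [' '] X (by decide)
lemma hitY (X : List Char) :
    repl ['y','e'] [' '] ('y' :: 'e' :: X) = ' ' :: repl ['y','e'] [' '] X := by
  simpa using repl_hit ['y','e'] [' '] X (by decide)
lemma hitW (X : List Char) :
    repl ['w','o','o'] [' '] ('w' :: 'o' :: 'o' :: X) = ' ' :: repl ['w','o','o'] [' '] X := by
  simpa using repl_hit ['w','o','o'] [' '] X (by decide)
lemma hitM (X : List Char) :
    repl ['m','a'] [' '] ('m' :: 'a' :: X) = ' ' :: repl ['m','a'] [' '] X := by
  simpa using repl_hit ['m','a'] [' '] X (by decide)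
lemma hitD (X : List Char) :
    repl [' '] [] (' ' :: X) = repl [' '] [] X := by
  simpa using repl_hit [' '] [] X (by decide)

def Fw (w : List Char) : List Char :=
  repl [' '] [] (repl ['m', 'a'] [' '] (repl ['w', 'o', 'o'] [' ']
    (repl ['y', 'e'] [' '] (repl ['a', 'y', 'a'] [' '] w))))

lemma Fw_nil : Fw [] = [] := by simp [Fw, repl]

lemma Fw_sp (r : List Char) : Fw (' ' :: r) = Fw r := by
  unfold Fw
  rw [skipA _ (by decide), skipY _ (by decide), skipW _ (by decide), skipM _ (by decide), hitD]

lemma Fw_aya (r : List Char) : Fw ('a' :: 'y' :: 'a' :: r) = Fw r := by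
  unfold Fw
  rw [hitA, skipY _ (by decide), skipW _ (by decide), skipM _ (by decide), hitD]

lemma Fw_ye (r : List Char) : Fw ('y' :: 'e' :: r) = Fw r := by
  unfold Fw
  rw [skipA _ (by decide), skipA _ (by decide), hitY, skipW _ (by decide), skipM _ (by decide), hitD]

lemma Fw_woo (r : List Char) : Fw ('w' :: 'o' :: 'o' :: r) = Fw r := by
  unfold Fw
  rw [skipA _ (by decide), skipA _ (by decide), skipA _ (by decide),
      skipY _ (by decide), skipY _ (by decide), skipY _ (by decide),
      hitW, skipM _ (by decide), hitD]

lemma Fw_ma (r : List Char) (h : ∀ r', r ≠ 'y' :: 'a' :: r') :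
    Fw ('m' :: 'a' :: r) = Fw r := by
  unfold Fw
  have hnp : ¬ (['a','y','a'] : List Char).isPrefixOf ('a' :: r) := by
    intro hp
    rw [List.isPrefixOf_iff_prefix] at hp
    obtain ⟨t, ht⟩ := hp
    simp at ht
    exact h t ht.symm
  rw [skipA _ (by decide), repl_not_prefix _ hnp,
      skipY _ (by decide), skipY _ (by decide),
      skipW _ (by decide), skipW _ (by decide), hitM, hitD]

-- non-prefix helpers driven by head information
lemma notpre_aya {X : List Char} (h : ∀ r', X ≠ 'y' :: 'a' :: r') :
    ¬ (['a','y','a'] : List Char).isPrefixOf ('a' :: X) := by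
  intro hp
  rw [List.isPrefixOf_iff_prefix] at hp
  obtain ⟨t, ht⟩ := hp
  simp at ht
  exact h t ht.symm
lemma notpre_ye {X : List Char} (h : X.head? ≠ some 'e') :
    ¬ (['y','e'] : List Char).isPrefixOf ('y' :: X) := by
  intro hp
  rw [List.isPrefixOf_iff_prefix] at hp
  obtain ⟨t, ht⟩ := hp
  simp at ht
  subst ht
  simp at h
lemma notpre_woo {X : List Char} (h : X.head? ≠ some 'o') :
    ¬ (['w','o','o'] : List Char).isPrefixOf ('w' :: X) := by
  intro hp
  rw [List.isPrefixOf_iff_prefix] at hp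
  obtain ⟨t, ht⟩ := hp
  simp at ht
  subst ht
  simp at h
lemma notpre_woo2 {X : List Char} (h : X.head? ≠ some 'o') :
    ¬ (['w','o','o'] : List Char).isPrefixOf ('w' :: 'o' :: X) := by
  intro hp
  rw [List.isPrefixOf_iff_prefix] at hp
  obtain ⟨t, ht⟩ := hp
  simp at ht
  subst ht
  simp at h
lemma notpre_ma {X : List Char} (h : X.head? ≠ some 'a') :
    ¬ (['m','a'] : List Char).isPrefixOf ('m' :: X) := by
  intro hp
  rw [List.isPrefixOf_iff_prefix] at hp
  obtain ⟨t, ht⟩ := hp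
  simp at ht
  subst ht
  simp at h

-- heads survive the first stages (as themselves or as a space)
lemma head_chain2 (r : List Char) :
    (repl ['y','e'] [' '] (repl ['a','y','a'] [' '] r)).head? = r.head? ∨
      (repl ['y','e'] [' '] (repl ['a','y','a'] [' '] r)).head? = some ' ' := by
  rcases repl_head_sp ['y','e'] (repl ['a','y','a'] [' '] r) with h | h <;>
    rcases repl_head_sp ['a','y','a'] r with h' | h' <;> simp_all
lemma head_chain3 (r : List Char) :
    (repl ['w','o','o'] [' '] (repl ['y','e'] [' '] (repl ['a','y','a'] [' '] r))).head? = r.head? ∨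
      (repl ['w','o','o'] [' '] (repl ['y','e'] [' '] (repl ['a','y','a'] [' '] r))).head? = some ' ' := by
  rcases repl_head_sp ['w','o','o'] (repl ['y','e'] [' '] (repl ['a','y','a'] [' '] r)) with h | h <;>
    rcases head_chain2 r with h' | h' <;> simp_all

lemma Fw_maya (r : List Char) : Fw ('m' :: 'a' :: 'y' :: 'a' :: r) ≠ [] := by
  unfold Fw
  rw [skipA _ (by decide), hitA, skipY _ (by decide), skipY _ (by decide),
      skipW _ (by decide), skipW _ (by decide),
      repl_not_prefix _ (by simp [List.isPrefixOf]), skipM _ (by decide),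
      skipD _ (by decide)]
  simp

lemma Fw_junk_a (r : List Char) (h : ∀ r', r ≠ 'y' :: 'a' :: r') : Fw ('a' :: r) ≠ [] := by
  unfold Fw
  rw [repl_not_prefix _ (notpre_aya h), skipY _ (by decide), skipW _ (by decide),
      skipM _ (by decide), skipD _ (by decide)]
  simp

lemma Fw_junk_y (r : List Char) (h : r.head? ≠ some 'e') : Fw ('y' :: r) ≠ [] := by
  unfold Fw
  have hh : (repl ['a','y','a'] [' '] r).head? ≠ some 'e' := by
    rcases repl_head_sp ['a','y','a'] r with h' | h' <;> simp_all
  rw [skipA _ (by decide), repl_not_prefix _ (notpre_ye hh), skipW _ (by decide),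
      skipM _ (by decide), skipD _ (by decide)]
  simp

lemma Fw_junk_w (r : List Char) (h : ∀ r', r ≠ 'o' :: 'o' :: r') : Fw ('w' :: r) ≠ [] := by
  unfold Fw
  match r, h with
  | [], _ =>
    rw [skipA _ (by decide),
        show (repl ['a','y','a'] [' '] ([] : List Char)) = [] from by rw [repl],
        skipY _ (by decide),
        show (repl ['y','e'] [' '] ([] : List Char)) = [] from by rw [repl],
        repl_not_prefix _ (notpre_woo (by simp)),
        show (repl ['w','o','o'] [' '] ([] : List Char)) = [] from by rw [repl],
        skipM _ (by decide),
        show (repl ['m','a'] [' '] ([] : List Char)) = [] from by rw [repl],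
        skipD _ (by decide)]
    simp
  | c2 :: r2, h =>
    by_cases hc2 : c2 = 'o'
    · subst hc2
      have hr2 : r2.head? ≠ some 'o' := by
        cases r2 with
        | nil => simp
        | cons x t => intro hx; simp at hx; exact h t (by rw [hx])
      have hh : (repl ['y','e'] [' '] (repl ['a','y','a'] [' '] r2)).head? ≠ some 'o' := by
        rcases head_chain2 r2 with h' | h' <;> simp_all
      rw [skipA _ (by decide), skipA _ (by decide), skipY _ (by decide), skipY _ (by decide),
          repl_not_prefix _ (notpre_woo2 hh), skipM _ (by decide), skipD _ (by decide)]
      simp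
    · have hh : (repl ['y','e'] [' '] (repl ['a','y','a'] [' '] (c2 :: r2))).head? ≠ some 'o' := by
        rcases head_chain2 (c2 :: r2) with h' | h' <;> simp_all
      rw [skipA _ (by decide), skipY _ (by decide),
          repl_not_prefix _ (notpre_woo hh), skipM _ (by decide), skipD _ (by decide)]
      simp

lemma Fw_junk_m (r : List Char) (h : r.head? ≠ some 'a') : Fw ('m' :: r) ≠ [] := by
  unfold Fw
  have hh : (repl ['w','o','o'] [' '] (repl ['y','e'] [' '] (repl ['a','y','a'] [' '] r))).head? ≠ some 'a' := by
    rcases head_chain3 r with h' | h' <;> simp_all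
  rw [skipA _ (by decide), skipY _ (by decide), skipW _ (by decide),
      repl_not_prefix _ (notpre_ma hh), skipD _ (by decide)]
  simp

lemma Fw_junk_other (c : Char) (r : List Char)
    (h : c ≠ 'a' ∧ c ≠ 'y' ∧ c ≠ 'w' ∧ c ≠ 'm' ∧ c ≠ ' ') : Fw (c :: r) ≠ [] := by
  obtain ⟨h1, h2, h3, h4, h5⟩ := h
  unfold Fw
  rw [skipA _ h1, skipY _ h2, skipW _ h3, skipM _ h4, skipD _ h5]
  simp



lemma Fw_isEmpty_eq_spaceOk (w : List Char) : (Fw w).isEmpty = spaceOk w := by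
  induction w using spaceOk.induct with
  | case1 r ih => rw [Fw_aya]; simp only [spaceOk]; exact ih
  | case2 r ih => rw [Fw_ye]; simp only [spaceOk]; exact ih
  | case3 r ih => rw [Fw_woo]; simp only [spaceOk]; exact ih
  | case4 r ih =>
    by_cases hya : ∃ r', r = 'y' :: 'a' :: r'
    · obtain ⟨r', rfl⟩ := hya
      have h1 : Fw ('m' :: 'a' :: 'y' :: 'a' :: r') ≠ [] := Fw_maya r'
      have h2 : spaceOk ('m' :: 'a' :: 'y' :: 'a' :: r') = false := by
        simp only [spaceOk]
        rw [spaceOk.eq_def]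
        simp
      rw [h2, List.isEmpty_eq_false_iff]
      exact h1
    · push Not at hya
      rw [Fw_ma r hya]; simp only [spaceOk]; exact ih
  | case5 r ih => rw [Fw_sp]; simp only [spaceOk]; exact ih
  | case6 => rw [Fw_nil]; simp [spaceOk]
  | case7 t h1 h2 h3 h4 h5 h6 =>
    have hs : spaceOk t = false := by
      rw [spaceOk.eq_def]
      split <;> simp_all
    rw [hs, List.isEmpty_eq_false_iff]
    cases t with
    | nil => exact absurd rfl h6
    | cons c r =>
      by_cases hc1 : c = 'a'
      · subst hc1
        exact Fw_junk_a r (fun r' hr => h1 r' (by rw [hr]))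
      · by_cases hc2 : c = 'y'
        · subst hc2
          refine Fw_junk_y r ?_
          intro he
          cases r with
          | nil => simp at he
          | cons x rr => simp at he; exact h2 rr (by rw [he])
        · by_cases hc3 : c = 'w'
          · subst hc3
            exact Fw_junk_w r (fun r' hr => h3 r' (by rw [hr]))
          · by_cases hc4 : c = 'm'
            · subst hc4
              refine Fw_junk_m r ?_
              intro ha
              cases r with
              | nil => simp at ha
              | cons x rr => simp at ha; exact h4 rr (by rw [ha])
            · by_cases hc5 : c = ' '
              · subst hc5; exact absurd rfl (h5 r)
              · exact Fw_junk_other c r ⟨hc1, hc2, hc3, hc4, hc5⟩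

def okSuf : List Char → Bool
  | 'a' :: 'y' :: 'a' :: r => okSuf r
  | 'y' :: 'e' :: r => okSuf r
  | 'w' :: 'o' :: 'o' :: r => okSuf r
  | 'm' :: 'a' :: r => okSuf r
  | [] => true
  | _ => false

lemma okSuf_cases (s : List Char) (hs : s ≠ []) :
    okSuf s =
      (if PySem.Chars.startswith s ['a', 'y', 'a'] then okSuf (s.drop 3)
       else if PySem.Chars.startswith s ['y', 'e'] then okSuf (s.drop 2)
       else if PySem.Chars.startswith s ['w', 'o', 'o'] then okSuf (s.drop 3)
       else if PySem.Chars.startswith s ['m', 'a'] then okSuf (s.drop 2)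
       else false) := by
  induction s using okSuf.induct with
  | case1 r ih =>
    rw [if_pos (by rw [PySem.Chars.startswith_iff]; exact ⟨r, rfl⟩)]
    simp [okSuf]
  | case2 r ih =>
    rw [if_neg (by rw [PySem.Chars.startswith_iff]; rintro ⟨t, ht⟩; simp at ht),
        if_pos (by rw [PySem.Chars.startswith_iff]; exact ⟨r, rfl⟩)]
    simp [okSuf]
  | case3 r ih =>
    rw [if_neg (by rw [PySem.Chars.startswith_iff]; rintro ⟨t, ht⟩; simp at ht),
        if_neg (by rw [PySem.Chars.startswith_iff]; rintro ⟨t, ht⟩; simp at ht),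
        if_pos (by rw [PySem.Chars.startswith_iff]; exact ⟨r, rfl⟩)]
    simp [okSuf]
  | case4 r ih =>
    rw [if_neg (by rw [PySem.Chars.startswith_iff]; rintro ⟨t, ht⟩; simp at ht),
        if_neg (by rw [PySem.Chars.startswith_iff]; rintro ⟨t, ht⟩; simp at ht),
        if_neg (by rw [PySem.Chars.startswith_iff]; rintro ⟨t, ht⟩; simp at ht),
        if_pos (by rw [PySem.Chars.startswith_iff]; exact ⟨r, rfl⟩)]
    simp [okSuf]
  | case5 => simp at hs
  | case6 t h1 h2 h3 h4 h5 =>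
    rw [if_neg (by rw [PySem.Chars.startswith_iff]; rintro ⟨t', ht'⟩
                   exact h1 t' (by simpa using ht'.symm)),
        if_neg (by rw [PySem.Chars.startswith_iff]; rintro ⟨t', ht'⟩
                   exact h2 t' (by simpa using ht'.symm)),
        if_neg (by rw [PySem.Chars.startswith_iff]; rintro ⟨t', ht'⟩
                   exact h3 t' (by simpa using ht'.symm)),
        if_neg (by rw [PySem.Chars.startswith_iff]; rintro ⟨t', ht'⟩
                   exact h4 t' (by simpa using ht'.symm))]
    rw [okSuf.eq_def]
    split <;> simp_all

lemma okAlt_eq_okSuf (w : List Char) (i : Nat) : okAlt w i = okSuf (w.drop i) := by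
  have main : ∀ n (w : List Char) (i : Nat), w.length - i ≤ n → okAlt w i = okSuf (w.drop i) := by
    intro n
    induction n with
    | zero =>
      intro w i hn
      rw [okAlt]
      rw [dif_neg (by omega)]
      rw [List.drop_of_length_le (by omega)]
      rfl
    | succ n ih =>
      intro w i hn
      rw [okAlt]
      by_cases hi : i < w.length
      · rw [dif_pos hi, okSuf_cases (w.drop i) (by simp; omega)]
        have d3 : (w.drop i).drop 3 = w.drop (i + 3) := by rw [List.drop_drop]
        have d2 : (w.drop i).drop 2 = w.drop (i + 2) := by rw [List.drop_drop]
        rw [d3, d2]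
        split_ifs <;>
          first
            | exact ih w (i + 3) (by omega)
            | exact ih w (i + 2) (by omega)
            | rfl
      · rw [dif_neg hi, List.drop_of_length_le (by omega)]
        rfl
  exact main (w.length - i) w i le_rfl

lemma okSuf_no_space (w : List Char) (h : ' ' ∉ w) : okSuf w = spaceOk w := by
  induction w using okSuf.induct with
  | case1 r ih => simp only [okSuf, spaceOk]; exact ih (by simp at h; tauto)
  | case2 r ih => simp only [okSuf, spaceOk]; exact ih (by simp at h; tauto)
  | case3 r ih => simp only [okSuf, spaceOk]; exact ih (by simp at h; tauto)
  | case4 r ih => simp only [okSuf, spaceOk]; exact ih (by simp at h; tauto)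
  | case5 => simp [okSuf, spaceOk]
  | case6 t h1 h2 h3 h4 h5 =>
    have e1 : okSuf t = false := by rw [okSuf.eq_def]; split <;> simp_all
    have e2 : spaceOk t = false := by rw [spaceOk.eq_def]; split <;> simp_all
    rw [e1, e2]

lemma okSuf_true_no_space (w : List Char) (h : okSuf w = true) : ' ' ∉ w := by
  induction w using okSuf.induct with
  | case1 r ih => simp only [okSuf] at h; have := ih h; simp [this]
  | case2 r ih => simp only [okSuf] at h; have := ih h; simp [this]
  | case3 r ih => simp only [okSuf] at h; have := ih h; simp [this]
  | case4 r ih => simp only [okSuf] at h; have := ih h; simp [this]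
  | case5 => simp
  | case6 t h1 h2 h3 h4 h5 =>
    exfalso
    rw [okSuf.eq_def] at h
    split at h <;> simp_all

lemma countP_strict {α : Type} (p q : α → Bool) (l : List α)
    (hmono : ∀ x ∈ l, p x = true → q x = true)
    (x : α) (hx : x ∈ l) (hq : q x = true) (hp : p x = false) :
    List.countP p l < List.countP q l := by
  induction l with
  | nil => simp at hx
  | cons a t ih =>
    rcases List.mem_cons.mp hx with rfl | hxt
    · have hle : List.countP p t ≤ List.countP q t :=
        List.countP_mono_left (fun y hy => hmono y (List.mem_cons_of_mem _ hy))
      have e1 : List.countP p (x :: t) = List.countP p t := by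
        simp [hp]
      have e2 : List.countP q (x :: t) = List.countP q t + 1 := by
        simp [hq]
      omega
    · have hlt := ih (fun y hy => hmono y (List.mem_cons_of_mem _ hy)) hxt
      have hpq : (if p a = true then 1 else 0) ≤ (if q a = true then 1 else 0) := by
        by_cases hpa : p a = true
        · simp [hpa, hmono a List.mem_cons_self hpa]
        · simp only [hpa, Bool.false_eq_true, if_false]
          exact Nat.zero_le _
      simp only [List.countP_cons]
      omega


lemma perword (w : String) :
    (PySem.Str.len (PySem.Str.replace
        ((["aya", "ye", "woo", "ma"] : List String).foldl
          (fun x p => PySem.Str.replace x p " ") w) " " "") = 0)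
      ↔ (Fw w.toList).isEmpty = true := by
  have h1 : ((["aya", "ye", "woo", "ma"] : List String).foldl
      (fun x p => PySem.Str.replace x p " ") w)
      = PySem.Str.replace (PySem.Str.replace (PySem.Str.replace
          (PySem.Str.replace w "aya" " ") "ye" " ") "woo" " ") "ma" " " := by
    simp [List.foldl]
  rw [h1]
  have h2 : (PySem.Str.replace (PySem.Str.replace (PySem.Str.replace (PySem.Str.replace
      (PySem.Str.replace w "aya" " ") "ye" " ") "woo" " ") "ma" " ") " " "").toList
      = Fw w.toList := by
    simp only [PySem.Str.toList_replace]
    rw [replace_eq_repl _ _ _ (by decide), replace_eq_repl _ _ _ (by decide),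
        replace_eq_repl _ _ _ (by decide), replace_eq_repl _ _ _ (by decide),
        replace_eq_repl _ _ _ (by decide)]
    rw [show (" " : String).toList = [' '] from by decide,
        show ("" : String).toList = [] from by decide,
        show ("aya" : String).toList = ['a','y','a'] from by decide,
        show ("ye" : String).toList = ['y','e'] from by decide,
        show ("woo" : String).toList = ['w','o','o'] from by decide,
        show ("ma" : String).toList = ['m','a'] from by decide]
    rfl
  rw [PySem.Str.len_eq, h2]
  rw [List.isEmpty_iff, ← List.length_eq_zero_iff]
  omega

lemma solution_eq_countP (babbling : List String) :
    solution babbling = ((babbling.countP (fun w => (Fw w.toList).isEmpty) : Nat) : Int) := by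
  unfold solution
  rw [show (fun (answer : Int) (word : String) =>
      let word1 := (["aya", "ye", "woo", "ma"] : List String).foldl
        (fun w p => PySem.Str.replace w p " ") word
      let word2 := PySem.Str.replace word1 " " ""
      if PySem.Str.len word2 = 0 then answer + 1 else answer)
      = (fun (acc : Int) (x : String) =>
          if (fun w => (Fw w.toList).isEmpty) x = true then acc + 1 else acc) from ?_]
  · rw [PySem.List.foldl_count_if]
    simp
  · funext acc x
    dsimp only
    by_cases hc : PySem.Str.len (PySem.Str.replace
        ((["aya", "ye", "woo", "ma"] : List String).foldl
          (fun w p => PySem.Str.replace w p " ") x) " " "") = 0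
    · rw [if_pos hc, if_pos ((perword x).mp hc)]
    · rw [if_neg hc, if_neg (fun hb => hc ((perword x).mpr hb))]
lemma solution_alt_eq_countP (babbling : List String) :
    solution_alt babbling = ((babbling.countP (fun w => okAlt w.toList 0) : Nat) : Int) := by
  unfold solution_alt
  rw [PySem.List.sum_map_ite_one_zero]

-- ===== VERDICT (by name: the statement is the Claim_ definition above) =====
theorem solution_spec : Claim_unchanged_solution := by
  intro babbling _dom
  unfold Spec_solution
  intro hD
  unfold D_solution at hD
  rw [solution_eq_countP, solution_alt_eq_countP]
  congr 1
  apply List.countP_congr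
  intro w hw
  have hbe : (Fw w.toList).isEmpty = okAlt w.toList 0 := by
    rw [Fw_isEmpty_eq_spaceOk, okAlt_eq_okSuf, List.drop_zero]
    by_cases hsp : ' ' ∈ w.toList
    · have hok : okSuf w.toList = false := by
        cases h' : okSuf w.toList
        · rfl
        · exact absurd hsp (okSuf_true_no_space _ h')
      have hso : spaceOk w.toList = false := by
        cases h' : spaceOk w.toList
        · rfl
        · exact absurd ⟨w, hw, hsp, h'⟩ hD
      rw [hok, hso]
    · exact (okSuf_no_space _ hsp).symm
  rw [hbe]

theorem solution_changed : Claim_changed_solution := by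
  unfold Claim_changed_solution
  refine ⟨by decide, by decide, by decide, ?_, by decide⟩
  have h : okAlt ['a', 'y', 'a', ' ', 'm', 'a'] 0 = false := by
    rw [okAlt_eq_okSuf]
    decide
  simp [solution_alt, pvDiffWitness_solution, pvDiffWitnessOut_solution, h]

theorem solution_tight : Claim_exact_solution := by
  intro babbling _dom hD
  unfold D_solution at hD
  obtain ⟨w0, hmem, hsp, hsok⟩ := hD
  rw [solution_eq_countP, solution_alt_eq_countP]
  intro heq
  have hc : babbling.countP (fun w => (Fw w.toList).isEmpty)
      = babbling.countP (fun w => okAlt w.toList 0) := by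
    exact_mod_cast heq
  have hlt : babbling.countP (fun w => okAlt w.toList 0)
      < babbling.countP (fun w => (Fw w.toList).isEmpty) := by
    apply countP_strict _ _ _ ?_ w0 hmem ?_ ?_
    · intro x _hx hpx
      rw [okAlt_eq_okSuf, List.drop_zero] at hpx
      have hnsp := okSuf_true_no_space _ hpx
      rw [Fw_isEmpty_eq_spaceOk, ← okSuf_no_space _ hnsp]
      exact hpx
    · rw [Fw_isEmpty_eq_spaceOk]; exact hsok
    · rw [okAlt_eq_okSuf, List.drop_zero]
      cases h' : okSuf w0.toList
      · rfl
      · exact absurd hsp (okSuf_true_no_space _ h')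
  omega
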